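-- pv_equiv track=rewrite | github.com/GiorgioGSunnit/SunnitAI-BE | src/be/src/lex_package/parsing_utils/parser_capitolo.py | rebuild_table
-- ===== SOURCE A (Python) =====
-- def rebuild_table(table):
--     """
--     Ricostruisce le tabelle unendo righe spezzate.
--     """
--     ricostruita = []
--     riga_corrente = None
--
--     for riga in table:
--         if riga[0] is not None:
--             if riga_corrente:
--                 ricostruita.append(riga_corrente)
--             riga_corrente = riga.copy()
--         else:
--             for i, cella in enumerate(riga):
--                 if cella:
--                     if riga_corrente[i]:
--                         riga_corrente[i] += ' ' + cella
--                     else: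
--                         riga_corrente[i] = cella
--
--     if riga_corrente:
--         ricostruita.append(riga_corrente)
--
--     return ricostruita
-- ===== SOURCE B (Python) =====
-- def rebuild_table(table):
--     # Two-pass rewrite: first group rows (header + its continuation rows), then
--     # merge each group column-wise with ' '.join instead of incremental cell mutation.
--     groups = []
--     for riga in table:
--         if riga[0] is not None:
--             groups.append((riga, []))
--         elif groups:
--             groups[-1][1].append(riga)
--     return [_merge_group(header, cont) for header, cont in groups]
--
--
-- def _merge_group(header, cont):
--     return [_merge_cell(i, h, cont) for i, h in enumerate(header)]
--
--
-- def _merge_cell(i, h, cont):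
--     cells = [r[i] for r in cont if i < len(r) and r[i]]
--     if h:
--         return ' '.join([h] + cells)
--     if cells:
--         return ' '.join(cells)
--     return h
-- ===== Notes on version B (the rewrite author's own statement) =====
-- stated objective: alternative
-- what changed: B first groups the rows (each header row with its trailing continuation rows) in one pass and then rebuilds every group column-wise with ' '.join over the truthy cells of each column, instead of A's single stateful pass that mutates a current row cell by cell.
import Mathlib
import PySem

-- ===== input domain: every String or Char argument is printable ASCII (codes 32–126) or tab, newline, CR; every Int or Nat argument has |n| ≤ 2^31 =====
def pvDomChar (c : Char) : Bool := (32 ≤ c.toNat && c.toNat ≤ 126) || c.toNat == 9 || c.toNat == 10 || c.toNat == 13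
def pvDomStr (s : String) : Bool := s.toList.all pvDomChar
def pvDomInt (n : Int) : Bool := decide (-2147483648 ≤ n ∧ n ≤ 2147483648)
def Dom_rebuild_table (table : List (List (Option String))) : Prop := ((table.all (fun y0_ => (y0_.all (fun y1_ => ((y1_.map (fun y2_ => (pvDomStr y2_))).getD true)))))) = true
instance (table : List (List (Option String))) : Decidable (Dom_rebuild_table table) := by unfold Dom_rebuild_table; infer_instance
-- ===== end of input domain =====

-- B regroups the table in one pass and then rebuilds each group column-wise with ' '.join,
-- instead of A's single stateful pass mutating a current row cell by cell (objective: alternative).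

-- ===== PORT A =====

-- Python truthiness of a cell (None and '' are falsy)
def pvTruthy (c : Option String) : Bool :=
  match c with
  | none => false
  | some s => decide (s ≠ "")

-- body of A's inner loop: 'if cella: if riga_corrente[i]: … += ' ' + cella else … = cella'
def setCellA (cur : List (Option String)) (i : Nat) (cella : Option String) : List (Option String) :=
  if pvTruthy cella then
    match cur[i]? with
    | some old =>
        if pvTruthy old then cur.set i (some (old.getD "" ++ " " ++ cella.getD ""))
        else cur.set i cella
    | none => cur          -- Python raises IndexError here (outside Pre_)
  else cur

-- inner loop 'for i, cella in enumerate(riga): …' of A, mutating riga_corrente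
def mergeLoopA : List (Option String) → Nat → List (Option String) → List (Option String)
  | cur, _, [] => cur
  | cur, i, cella :: rest => mergeLoopA (setCellA cur i cella) (i + 1) rest

def mergeRowA (cur riga : List (Option String)) : List (Option String) := mergeLoopA cur 0 riga

-- main loop of A over the rows, state (ricostruita, riga_corrente)
def loopA : List (List (Option String)) → Option (List (Option String)) → List (List (Option String)) → List (List (Option String)) × Option (List (Option String))
  | acc, cur, [] => (acc, cur)
  | acc, cur, riga :: rest =>
    match riga.head? with
    | none => loopA acc cur rest                 -- Python raises IndexError on riga[0] (outside Pre_)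
    | some c0 =>
      if c0.isSome then
        match cur with
        | some rc => if rc.isEmpty then loopA acc (some riga) rest else loopA (acc ++ [rc]) (some riga) rest
        | none => loopA acc (some riga) rest
      else
        match cur with
        | some rc => loopA acc (some (mergeRowA rc riga)) rest
        | none => loopA acc cur rest             -- Python raises TypeError if riga has a truthy cell (outside Pre_)

def rebuild_table (table : List (List (Option String))) : List (List (Option String)) :=
  let st := loopA [] none table
  match st.2 with
  | some rc => if rc.isEmpty then st.1 else st.1 ++ [rc]
  | none => st.1

-- ===== PORT B =====

-- riga[0] is not None (Python raises IndexError on an empty row — outside Pre_)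
def isHeaderB (r : List (Option String)) : Bool :=
  match r.head? with
  | some c0 => c0.isSome
  | none => false

-- groups[-1][1].append(riga)
def appendLastB : List ((List (Option String)) × List (List (Option String))) → List (Option String) → List ((List (Option String)) × List (List (Option String)))
  | [], _ => []
  | g :: gs, r =>
    match gs with
    | [] => [(g.1, g.2 ++ [r])]
    | _ :: _ => g :: appendLastB gs r

-- first pass of B: group the rows into (header, continuation rows) pairs
def loopB : List ((List (Option String)) × List (List (Option String))) → List (List (Option String)) → List ((List (Option String)) × List (List (Option String)))
  | gs, [] => gs
  | gs, riga :: rest =>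
    if isHeaderB riga then loopB (gs ++ [(riga, [])]) rest
    else if gs.isEmpty then loopB gs rest
    else loopB (appendLastB gs riga) rest

-- _merge_cell(i, h, cont)
def mergeCellB (i : Nat) (h : Option String) (cont : List (List (Option String))) : Option String :=
  let cells := cont.filterMap (fun r =>
    match r[i]? with
    | some (some s) => if s = "" then none else some s
    | _ => none)
  if pvTruthy h then some (PySem.Str.join " " (h.getD "" :: cells))
  else if cells.isEmpty then h
  else some (PySem.Str.join " " cells)

-- [_merge_cell(i, h, cont) for i, h in enumerate(header)]
def mergeGroupGoB : Nat → List (Option String) → List (List (Option String)) → List (Option String)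
  | _, [], _ => []
  | i, h :: t, cont => mergeCellB i h cont :: mergeGroupGoB (i + 1) t cont

def mergeGroupB (header : List (Option String)) (cont : List (List (Option String))) : List (Option String) :=
  mergeGroupGoB 0 header cont

def rebuild_table_alt (table : List (List (Option String))) : List (List (Option String)) :=
  (loopB [] table).map (fun g => mergeGroupB g.1 g.2)

-- ===== PRECONDITION & SPEC =====

-- Pre_ admits exactly the inputs on which Python A returns: every row nonempty (riga[0] exists),
-- continuation rows before the first header have no truthy cell (else TypeError on None[i]),
-- and each continuation row's truthy cells lie within its header's length (else IndexError).
def preAux : Option Nat → List (List (Option String)) → Bool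
  | _, [] => true
  | hl, r :: t =>
    match r with
    | [] => false
    | c :: _ =>
      if c.isSome then preAux (some r.length) t
      else
        (match hl with
         | none => r.all (fun cell => !pvTruthy cell)
         | some n => (r.drop n).all (fun cell => !pvTruthy cell)) && preAux hl t

def Pre_rebuild_table (table : List (List (Option String))) : Prop := preAux none table = true
instance (table : List (List (Option String))) : Decidable (Pre_rebuild_table table) := by unfold Pre_rebuild_table; infer_instance

def pvWitness_rebuild_table : List (List (Option String)) :=
  [[some "a", none], [none, some "b"], [some "c", some "d"], [none, some "e"]]

def Spec_rebuild_table (table : List (List (Option String))) (out : List (List (Option String))) : Prop := out = rebuild_table_alt table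
instance (table : List (List (Option String))) (out : List (List (Option String))) : Decidable (Spec_rebuild_table table out) := by unfold Spec_rebuild_table; infer_instance

-- ===== CLAIM (what is proved, stated in full; the proofs are below) =====
def Claim_equal_rebuild_table : Prop := ∀ (table : List (List (Option String))), Dom_rebuild_table table → Pre_rebuild_table table → Spec_rebuild_table table (rebuild_table table)

-- ===== LEMMAS AND PROOFS =====

-- one cell of A's merge rule, as a pure function
def cellStep (a c : Option String) : Option String :=
  if pvTruthy c then (if pvTruthy a then some (a.getD "" ++ " " ++ c.getD "") else c) else a

theorem length_setCellA (cur : List (Option String)) (i : Nat) (cella : Option String) :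
    (setCellA cur i cella).length = cur.length := by
  by_cases ht : pvTruthy cella = true
  · cases hc : cur[i]? with
    | none => simp [setCellA, ht, hc]
    | some old =>
      by_cases hold : pvTruthy old = true <;> simp [setCellA, ht, hc, hold]
  · simp [setCellA, ht]

theorem setCellA_getElem?_self (cur : List (Option String)) (i : Nat) (cella : Option String) :
    (setCellA cur i cella)[i]? = (cur[i]?).map (fun a => cellStep a cella) := by
  by_cases ht : pvTruthy cella = true
  · cases hc : cur[i]? with
    | none => simp [setCellA, cellStep, ht, hc]
    | some old =>
      obtain ⟨hlt, hgeq⟩ := List.getElem?_eq_some_iff.mp hc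
      by_cases hold : pvTruthy old = true <;>
        simp [setCellA, cellStep, ht, hold, hlt, hgeq]
  · cases hc : cur[i]? <;> simp [setCellA, cellStep, ht, hc]

theorem setCellA_getElem?_ne (cur : List (Option String)) (i : Nat) (cella : Option String)
    (j : Nat) (hne : j ≠ i) : (setCellA cur i cella)[j]? = cur[j]? := by
  have hij : i ≠ j := Ne.symm hne
  by_cases ht : pvTruthy cella = true
  · cases hc : cur[i]? with
    | none => simp [setCellA, ht, hc]
    | some old =>
      by_cases hold : pvTruthy old = true <;>
        simp [setCellA, ht, hc, hold, hij]
  · simp [setCellA, ht]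

theorem length_mergeLoopA (r : List (Option String)) :
    ∀ cur i, (mergeLoopA cur i r).length = cur.length := by
  induction r with
  | nil => intro cur i; rfl
  | cons cella rest ih =>
    intro cur i
    simp only [mergeLoopA]
    rw [ih, length_setCellA]

theorem mergeLoopA_getElem? (r : List (Option String)) :
    ∀ cur i j, (mergeLoopA cur i r)[j]? =
      if i ≤ j ∧ j < i + r.length then (cur[j]?).map (fun a => cellStep a ((r[j - i]?).getD none)) else cur[j]? := by
  induction r with
  | nil =>
    intro cur i j
    simp only [mergeLoopA, List.length_nil]
    rw [if_neg (by omega)]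
  | cons cella rest ih =>
    intro cur i j
    simp only [mergeLoopA, List.length_cons]
    rw [ih]
    by_cases hj : j = i
    · subst hj
      rw [if_neg (by omega), if_pos (by omega)]
      rw [setCellA_getElem?_self]
      simp
    · rw [setCellA_getElem?_ne cur i cella j hj]
      by_cases hin : i + 1 ≤ j ∧ j < i + 1 + rest.length
      · rw [if_pos hin, if_pos (by omega)]
        have hsub : j - i = (j - (i + 1)) + 1 := by omega
        rw [hsub, List.getElem?_cons_succ]
      · rw [if_neg hin, if_neg (by omega)]

theorem mergeRowA_getElem? (h r : List (Option String)) (j : Nat) :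
    (mergeRowA h r)[j]? = (h[j]?).map (fun a => cellStep a ((r[j]?).getD none)) := by
  rw [mergeRowA, mergeLoopA_getElem?]
  by_cases hj : j < r.length
  · rw [if_pos (by omega)]
    simp
  · rw [if_neg (by omega)]
    rw [show r[j]? = (none : Option (Option String)) from List.getElem?_eq_none (by omega)]
    cases h[j]? <;> simp [cellStep, pvTruthy]

theorem length_mergeRowA (h r : List (Option String)) : (mergeRowA h r).length = h.length :=
  length_mergeLoopA r h 0

theorem length_foldl_mergeRowA (c : List (List (Option String))) :
    ∀ h, (List.foldl mergeRowA h c).length = h.length := by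
  induction c with
  | nil => intro h; rfl
  | cons r c ih => intro h; simp only [List.foldl_cons]; rw [ih, length_mergeRowA]

theorem foldl_mergeRowA_isEmpty (c : List (List (Option String))) (h : List (Option String))
    (hne : h ≠ []) : (List.foldl mergeRowA h c).isEmpty = false := by
  have hlen := length_foldl_mergeRowA c h
  cases hfl : List.foldl mergeRowA h c with
  | nil =>
    rw [hfl] at hlen
    simp only [List.length_nil] at hlen
    exact absurd (List.length_eq_zero_iff.mp hlen.symm) hne
  | cons a l => rfl

theorem mergeGroupGoB_getElem? (h : List (Option String)) :
    ∀ i cont j, (mergeGroupGoB i h cont)[j]? = (h[j]?).map (fun x => mergeCellB (i + j) x cont) := by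
  induction h with
  | nil => intro i cont j; simp [mergeGroupGoB]
  | cons x t ih =>
    intro i cont j
    cases j with
    | zero => simp [mergeGroupGoB]
    | succ j => simp [mergeGroupGoB, ih (i + 1) cont j, Nat.add_assoc, Nat.add_comm 1 j]

-- string facts
theorem join_single (s : String) : PySem.Str.join " " [s] = s := by
  apply String.toList_inj.mp
  simp [PySem.Chars.join_singleton]

theorem join_cons₂ (x y : String) (L : List String) :
    PySem.Str.join " " (x :: y :: L) = x ++ " " ++ PySem.Str.join " " (y :: L) := by
  apply String.toList_inj.mp
  simp [PySem.Chars.join_cons_cons]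

theorem join_merge (x y : String) (L : List String) :
    PySem.Str.join " " ((x ++ " " ++ y) :: L) = x ++ " " ++ PySem.Str.join " " (y :: L) := by
  apply String.toList_inj.mp
  cases L with
  | nil => simp [PySem.Chars.join_singleton]
  | cons z L => simp [PySem.Chars.join_cons_cons]

theorem mergeCellB_nil (j : Nat) (x : Option String) : mergeCellB j x [] = x := by
  unfold mergeCellB
  cases x with
  | none => simp [pvTruthy]
  | some s =>
    by_cases hs : s = "" <;> simp [pvTruthy, hs, join_single]

-- the heart: A's cell-wise merge of one continuation row commutes with B's column-wise rebuild
theorem mergeCellB_step (j : Nat) (a : Option String) (r : List (Option String)) (cont : List (List (Option String))) :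
    mergeCellB j (cellStep a ((r[j]?).getD none)) cont = mergeCellB j a (r :: cont) := by
  unfold mergeCellB
  simp only [List.filterMap_cons]
  cases hr : r[j]? with
  | none => simp [cellStep, pvTruthy]
  | some c =>
    cases c with
    | none => simp [cellStep, pvTruthy]
    | some s =>
      by_cases hs : s = ""
      · simp [hs, cellStep, pvTruthy]
      · have hts : pvTruthy (some s) = true := by simp [pvTruthy, hs]
        cases a with
        | none => simp [hs, cellStep, pvTruthy]
        | some as =>
          by_cases has : as = ""
          · simp [has, hs, cellStep, pvTruthy]
          · have h1 : pvTruthy (some as) = true := by simp [pvTruthy, has]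
            have h2 : pvTruthy (some (as ++ " " ++ s)) = true := by
              simp [pvTruthy]
            simp [cellStep, h1, h2, hs, hts, join_merge, join_cons₂]

theorem mergeGroupB_step (h r : List (Option String)) (cont : List (List (Option String))) :
    mergeGroupB (mergeRowA h r) cont = mergeGroupB h (r :: cont) := by
  apply List.ext_getElem?
  intro j
  rw [mergeGroupB, mergeGroupB, mergeGroupGoB_getElem?, mergeGroupGoB_getElem?, mergeRowA_getElem?]
  cases h' : h[j]? with
  | none => rfl
  | some a => simp only [Option.map_some, Nat.zero_add, mergeCellB_step]

theorem mergeGroupB_nil (h : List (Option String)) : mergeGroupB h [] = h := by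
  apply List.ext_getElem?
  intro j
  rw [mergeGroupB, mergeGroupGoB_getElem?]
  cases h' : h[j]? with
  | none => rfl
  | some a => simp [mergeCellB_nil]

theorem foldl_mergeRowA_eq (cont : List (List (Option String))) :
    ∀ h, List.foldl mergeRowA h cont = mergeGroupB h cont := by
  induction cont with
  | nil => intro h; rw [List.foldl_nil, mergeGroupB_nil]
  | cons r c ih =>
    intro h
    simp only [List.foldl_cons]
    rw [ih, mergeGroupB_step]

theorem appendLastB_append (gs : List ((List (Option String)) × List (List (Option String)))) (h : List (Option String)) (conts : List (List (Option String))) (r : List (Option String)) :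
    appendLastB (gs ++ [(h, conts)]) r = gs ++ [(h, conts ++ [r])] := by
  induction gs with
  | nil => rfl
  | cons g gs ih =>
    cases gs with
    | nil => simp [appendLastB]
    | cons g' gs' => simpa [appendLastB] using ih

theorem mergeRowA_nil (cur : List (Option String)) : mergeRowA cur [] = cur := rfl

-- finish of A: the trailing 'if riga_corrente: ricostruita.append(riga_corrente)'
def finishA (st : List (List (Option String)) × Option (List (Option String))) : List (List (Option String)) :=
  match st.2 with
  | some rc => if rc.isEmpty then st.1 else st.1 ++ [rc]
  | none => st.1

theorem loopA_some_eq (t : List (List (Option String))) :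
    ∀ (gs : List ((List (Option String)) × List (List (Option String)))) (h : List (Option String)) (conts : List (List (Option String))),
      h ≠ [] →
      finishA (loopA (gs.map (fun g => List.foldl mergeRowA g.1 g.2)) (some (List.foldl mergeRowA h conts)) t)
        = (loopB (gs ++ [(h, conts)]) t).map (fun g => mergeGroupB g.1 g.2) := by
  induction t with
  | nil =>
    intro gs h conts hne
    simp only [loopA, loopB, finishA, foldl_mergeRowA_isEmpty conts h hne]
    simp [foldl_mergeRowA_eq]
  | cons riga rest ih =>
    intro gs h conts hne
    cases riga with
    | nil =>
      -- empty row: A skips it; B appends it to the last group, where it merges as a no-op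
      simp only [loopA, loopB, List.head?_nil, isHeaderB]
      rw [List.isEmpty_eq_false_iff.mpr (by simp), if_neg (by simp), appendLastB_append]
      have hfold : List.foldl mergeRowA h (conts ++ [([] : List (Option String))]) = List.foldl mergeRowA h conts := by
        simp [List.foldl_append, mergeRowA_nil]
      have := ih gs h (conts ++ [([] : List (Option String))]) hne
      rw [hfold] at this
      exact this
    | cons c0 rrest =>
      cases c0 with
      | some s =>
        -- header row: A flushes the current row, B opens a new group
        have e1 : loopA (gs.map (fun g => List.foldl mergeRowA g.1 g.2)) (some (List.foldl mergeRowA h conts)) ((some s :: rrest) :: rest)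
            = loopA (gs.map (fun g => List.foldl mergeRowA g.1 g.2) ++ [List.foldl mergeRowA h conts]) (some (some s :: rrest)) rest := by
          simp [loopA, foldl_mergeRowA_isEmpty conts h hne]
        have e2 : loopB (gs ++ [(h, conts)]) ((some s :: rrest) :: rest)
            = loopB ((gs ++ [(h, conts)]) ++ [(some s :: rrest, [])]) rest := by
          simp [loopB, isHeaderB]
        rw [e1, e2]
        have := ih (gs ++ [(h, conts)]) (some s :: rrest) [] (by simp)
        simpa [List.map_append] using this
      | none =>
        -- continuation row: A merges it into the current row, B appends it to the last group
        have e1 : loopA (gs.map (fun g => List.foldl mergeRowA g.1 g.2)) (some (List.foldl mergeRowA h conts)) ((none :: rrest) :: rest)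
            = loopA (gs.map (fun g => List.foldl mergeRowA g.1 g.2)) (some (mergeRowA (List.foldl mergeRowA h conts) (none :: rrest))) rest := by
          simp [loopA]
        have e2 : loopB (gs ++ [(h, conts)]) ((none :: rrest) :: rest)
            = loopB (gs ++ [(h, conts ++ [none :: rrest])]) rest := by
          simp [loopB, isHeaderB, appendLastB_append]
        rw [e1, e2]
        have := ih gs h (conts ++ [none :: rrest]) hne
        rw [List.foldl_append] at this
        simpa using this

theorem loopA_none_eq (t : List (List (Option String))) :
    finishA (loopA [] none t) = (loopB [] t).map (fun g => mergeGroupB g.1 g.2) := by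
  induction t with
  | nil => rfl
  | cons riga rest ih =>
    cases riga with
    | nil =>
      simpa only [loopA, loopB, List.head?_nil, isHeaderB, List.isEmpty_nil, if_true, if_neg] using ih
    | cons c0 rrest =>
      cases c0 with
      | some s =>
        simp only [loopA, loopB, List.head?_cons, Option.isSome_some, if_true, isHeaderB]
        have := loopA_some_eq rest [] (some s :: rrest) [] (by simp)
        simpa using this
      | none =>
        simpa only [loopA, loopB, List.head?_cons, Option.isSome_none, if_false, isHeaderB,
          List.isEmpty_nil, if_true] using ih

theorem ports_eq (table : List (List (Option String))) : rebuild_table table = rebuild_table_alt table := by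
  have h : rebuild_table table = finishA (loopA [] none table) := rfl
  rw [h, loopA_none_eq]
  rfl

-- ===== VERDICT (by name: the statement is the Claim_ definition above) =====
theorem rebuild_table_spec : Claim_equal_rebuild_table := by
  intro table _ _
  unfold Spec_rebuild_table
  exact ports_eq table
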